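-- pv_equiv track=rewrite | github.com/nicoaira/GINFINITY | src/ginfinity/scripts/align_node_embeddings_batch.py | pair_batcher
-- ===== SOURCE A (Python) =====
-- from typing import Dict, Iterable, List, Optional, Sequence, Tuple
--
-- def pair_batcher(n: int, batch_size: int) -> Iterable[List[Tuple[int, int]]]:
--     # Generate all i<j pairs and yield batches
--     batch: List[Tuple[int, int]] = []
--     for i in range(n):
--         for j in range(i + 1, n):
--             batch.append((i, j))
--             if len(batch) >= batch_size:
--                 yield batch
--                 batch = []
--     if batch:
--         yield batch
-- ===== SOURCE B (Python) =====
-- def pair_batcher(n, batch_size):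
--     # Closed-form pair count + index unranking: each batch is computed directly
--     # from its global pair indices; no nested loop, no running accumulator.
--     def base(i):
--         # number of pairs (a, b) with a < i
--         return i * (2 * n - i - 1) // 2
--
--     def unrank(k):
--         # largest row i with base(i) <= k, found by binary search
--         lo, hi = 0, n - 1
--         while hi - lo > 1:
--             mid = (lo + hi) // 2
--             if base(mid) <= k:
--                 lo = mid
--             else:
--                 hi = mid
--         return (lo, lo + 1 + (k - base(lo)))
--
--     total = n * (n - 1) // 2 if n >= 2 else 0
--     size = max(batch_size, 1)
--     start = 0
--     while start < total:
--         yield [unrank(k) for k in range(start, min(start + size, total))]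
--         start += size
-- ===== Notes on version B (the rewrite author's own statement) =====
-- stated objective: alternative
-- what changed: Replaces the nested i/j loop with a running accumulator by direct construction of each batch: the total pair count comes from the closed form n*(n-1)//2 and each pair is recovered from its global index by binary-searching the triangular row offsets (unranking), so no pair stream or batch buffer is maintained.
import Mathlib
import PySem

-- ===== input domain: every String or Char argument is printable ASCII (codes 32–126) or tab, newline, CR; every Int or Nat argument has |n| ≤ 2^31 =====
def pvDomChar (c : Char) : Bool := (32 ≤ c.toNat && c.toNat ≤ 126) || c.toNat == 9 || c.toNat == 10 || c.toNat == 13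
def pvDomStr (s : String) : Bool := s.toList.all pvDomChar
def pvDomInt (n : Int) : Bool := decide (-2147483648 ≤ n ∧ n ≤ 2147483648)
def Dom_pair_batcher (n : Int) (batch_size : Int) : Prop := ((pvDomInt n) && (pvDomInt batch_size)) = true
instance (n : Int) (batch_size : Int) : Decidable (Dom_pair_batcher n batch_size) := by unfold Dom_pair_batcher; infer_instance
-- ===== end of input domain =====

-- B replaces A's nested loop + running batch buffer by a closed-form pair count and
-- per-index unranking (binary search on triangular row offsets); same return value.

-- ===== PORT A =====
-- one loop-body step of A: batch.append((i,j)); if len(batch) >= batch_size: yield batch; batch = []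
def pairStep (batch_size : Int) (st : List (List (Int × Int)) × List (Int × Int))
    (p : Int × Int) : List (List (Int × Int)) × List (Int × Int) :=
  let batch := st.2 ++ [p]
  if (batch.length : Int) ≥ batch_size then (st.1 ++ [batch], []) else (st.1, batch)

def pair_batcher (n : Int) (batch_size : Int) : List (List (Int × Int)) :=
  let st := (PySem.List.pyRange 0 n 1).foldl
    (fun st i => (PySem.List.pyRange (i + 1) n 1).foldl
      (fun st j => pairStep batch_size st (i, j)) st)
    ([], [])
  if st.2.isEmpty then st.1 else st.1 ++ [st.2]

-- ===== PORT B =====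
-- base(i) = i * (2*n - i - 1) // 2, the number of pairs whose first component is < i
def bBase (n i : Int) : Int := PySem.Int.floordiv (i * (2 * n - i - 1)) 2

-- the binary-search while loop of B's unrank
def bSearch (n k lo hi : Int) : Int :=
  if _h : 1 < hi - lo then
    if bBase n (PySem.Int.floordiv (lo + hi) 2) ≤ k then
      bSearch n k (PySem.Int.floordiv (lo + hi) 2) hi
    else
      bSearch n k lo (PySem.Int.floordiv (lo + hi) 2)
  else lo
  termination_by (hi - lo).toNat
  decreasing_by
  · rw [PySem.Int.floordiv_eq_ediv_of_pos (by norm_num : (0:Int) < 2)]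
    omega
  · rw [PySem.Int.floordiv_eq_ediv_of_pos (by norm_num : (0:Int) < 2)]
    omega

def bUnrank (n k : Int) : Int × Int :=
  let lo := bSearch n k 0 (n - 1)
  (lo, lo + 1 + (k - bBase n lo))

-- B's 'while start < total' loop; s + 1 is B's size = max(batch_size, 1) (always ≥ 1,
-- written this way so the recursion on (total - start) is structural on a positive step)
def bLoop (n : Int) (s : Nat) (total start : Int) : List (List (Int × Int)) :=
  if h : start < total then
    ((PySem.List.pyRange start (min (start + ((s : Int) + 1)) total) 1).map (bUnrank n))
      :: bLoop n s total (start + ((s : Int) + 1))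
  else []
  termination_by (total - start).toNat
  decreasing_by omega

def pair_batcher_alt (n : Int) (batch_size : Int) : List (List (Int × Int)) :=
  let total := if 2 ≤ n then PySem.Int.floordiv (n * (n - 1)) 2 else 0
  bLoop n ((max batch_size 1).toNat - 1) total 0

-- ===== PRECONDITION & SPEC =====
def Spec_pair_batcher (n : Int) (batch_size : Int) (out : List (List (Int × Int))) : Prop := out = pair_batcher_alt n batch_size
instance (n : Int) (batch_size : Int) (out : List (List (Int × Int))) : Decidable (Spec_pair_batcher n batch_size out) := by unfold Spec_pair_batcher; infer_instance

-- ===== CLAIM (what is proved, stated in full; the proofs are below) =====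
def Claim_equal_pair_batcher : Prop := ∀ (n : Int) (batch_size : Int), Dom_pair_batcher n batch_size → Spec_pair_batcher n batch_size (pair_batcher n batch_size)

-- ===== LEMMAS AND PROOFS =====

-- A's pair stream, the common middle object of the proof
def pvStream (n : Int) : List (Int × Int) :=
  (PySem.List.pyRange 0 n 1).flatMap
    (fun i => (PySem.List.pyRange (i + 1) n 1).map (fun j => (i, j)))

-- chunking a list into pieces of size k+1 (proof-side normal form of both programs)
def pvChunks {α : Type} (k : Nat) : List α → List (List α)
  | [] => []
  | x :: xs => ((x :: xs).take (k + 1)) :: pvChunks k ((x :: xs).drop (k + 1))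
  termination_by l => l.length
  decreasing_by simp

theorem pv_foldl_flatMap {α β γ : Type} (f : γ → β → γ) (g : α → List β) (l : List α) (a : γ) :
    (l.flatMap g).foldl f a = l.foldl (fun a i => (g i).foldl f a) a := by
  induction l generalizing a with
  | nil => rfl
  | cons x xs ih => simp [List.flatMap_cons, List.foldl_append, ih]

-- A's accumulator run, specialised to chunk size s
def pvRun {α : Type} (s : Nat) : List α → List α → List (List α)
  | b, [] => if b.isEmpty then [] else [b]
  | b, p :: ps => if b.length + 1 = s then (b ++ [p]) :: pvRun s [] ps else pvRun s (b ++ [p]) ps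

theorem pvChunks_ne_nil {α : Type} (k : Nat) (l : List α) (h : l ≠ []) :
    pvChunks k l = l.take (k + 1) :: pvChunks k (l.drop (k + 1)) := by
  cases l with
  | nil => exact absurd rfl h
  | cons x xs => simp [pvChunks]

theorem pv_fold_run (batch_size : Int) (ps : List (Int × Int)) :
    ∀ (done : List (List (Int × Int))) (b : List (Int × Int)),
      b.length < (max batch_size 1).toNat →
      (let st := ps.foldl (pairStep batch_size) (done, b);
        if st.2.isEmpty then st.1 else st.1 ++ [st.2]) =
      done ++ pvRun (max batch_size 1).toNat b ps := by
  induction ps with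
  | nil =>
    intro done b _
    cases b with
    | nil => simp [pvRun]
    | cons x xs => simp [pvRun]
  | cons p ps ih =>
    intro done b hb
    by_cases hc : b.length + 1 = (max batch_size 1).toNat
    · have : pairStep batch_size (done, b) p = (done ++ [b ++ [p]], []) := by
        simp [pairStep]
        omega
      simp only [List.foldl_cons, this]
      rw [ih (done ++ [b ++ [p]]) [] (by simp)]
      simp [pvRun, hc]
    · have : pairStep batch_size (done, b) p = (done, b ++ [p]) := by
        simp [pairStep]
        omega
      simp only [List.foldl_cons, this]
      rw [ih done (b ++ [p]) (by simp; omega)]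
      simp [pvRun, hc]

theorem pv_run_chunks {α : Type} (s : Nat) (hs : 0 < s) (ps : List α) :
    ∀ (b : List α), b.length < s → pvRun s b ps = pvChunks (s - 1) (b ++ ps) := by
  induction ps with
  | nil =>
    intro b hb
    cases b with
    | nil => simp [pvRun]; simp [pvChunks]
    | cons x xs =>
      simp only [pvRun, List.isEmpty_cons, List.append_nil]
      rw [pvChunks_ne_nil (s - 1) (x :: xs) (by simp)]
      have h1 : (x :: xs).take (s - 1 + 1) = x :: xs :=
        List.take_of_length_le (by simp at hb ⊢; omega)
      have h2 : (x :: xs).drop (s - 1 + 1) = [] :=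
        List.drop_eq_nil_of_le (by simp at hb ⊢; omega)
      simp [h1, h2]
      simp [pvChunks]
  | cons p ps ih =>
    intro b hb
    by_cases hc : b.length + 1 = s
    · simp only [pvRun, if_pos hc]
      rw [ih [] (by simp; omega)]
      rw [pvChunks_ne_nil (s - 1) (b ++ p :: ps) (by simp)]
      have h1 : (b ++ p :: ps).take (s - 1 + 1) = b ++ [p] := by
        rw [List.take_append, List.take_of_length_le (by omega)]
        have : s - 1 + 1 - b.length = 1 := by omega
        simp [this]
      have h2 : (b ++ p :: ps).drop (s - 1 + 1) = ps := by
        rw [List.drop_append, List.drop_eq_nil_of_le (by omega)]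
        have : s - 1 + 1 - b.length = 1 := by omega
        simp [this]
      simp [h1, h2]
    · simp only [pvRun, if_neg hc]
      rw [ih (b ++ [p]) (by simp; omega)]
      simp

-- A equals chunking of the pair stream
theorem pvA_eq_chunks (n batch_size : Int) :
    pair_batcher n batch_size = pvChunks ((max batch_size 1).toNat - 1) (pvStream n) := by
  unfold pair_batcher
  have hnest :
      (PySem.List.pyRange 0 n 1).foldl
        (fun st i => (PySem.List.pyRange (i + 1) n 1).foldl
          (fun st j => pairStep batch_size st (i, j)) st)
        (([], []) : List (List (Int × Int)) × List (Int × Int)) =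
      (pvStream n).foldl (pairStep batch_size) ([], []) := by
    unfold pvStream
    rw [pv_foldl_flatMap]
    simp [List.foldl_map]
  simp only [hnest]
  rw [pv_fold_run batch_size _ [] [] (by simp)]
  rw [pv_run_chunks _ (by omega) _ [] (by simp)]
  simp

-- ===== B-side lemmas =====

theorem bBase_two (n i : Int) : 2 * bBase n i = i * (2 * n - i - 1) := by
  unfold bBase
  rcases Int.even_or_odd i with ⟨m, hm⟩ | ⟨m, hm⟩
  · have h : i * (2 * n - i - 1) = 2 * (m * (2 * n - i - 1)) := by rw [hm]; ring
    rw [h, PySem.Int.floordiv_eq_ediv_of_pos (by norm_num)]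
    omega
  · have h : i * (2 * n - i - 1) = 2 * (i * (n - m - 1)) := by rw [hm]; ring
    rw [h, PySem.Int.floordiv_eq_ediv_of_pos (by norm_num)]
    omega

theorem bBase_zero (n : Int) : bBase n 0 = 0 := by
  have h : 2 * bBase n 0 = 0 := by simpa using bBase_two n 0
  omega

theorem bBase_mono (n : Int) {i j : Int} (_h0 : 0 ≤ i) (hij : i ≤ j) (hj : j ≤ n - 1) :
    bBase n i ≤ bBase n j := by
  have h1 := bBase_two n i
  have h2 := bBase_two n j
  nlinarith [mul_nonneg (by omega : (0:Int) ≤ j - i) (by omega : (0:Int) ≤ 2 * n - i - j - 1)]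

theorem bBase_succ (n i : Int) : bBase n (i + 1) = bBase n i + (n - 1 - i) := by
  have ha := bBase_two n (i + 1)
  have hb := bBase_two n i
  have key : (i + 1) * (2 * n - (i + 1) - 1) = i * (2 * n - i - 1) + 2 * (n - 1 - i) := by ring
  linarith

theorem bSearch_spec (n k : Int) (m : Nat) : ∀ lo hi : Int, (hi - lo).toNat ≤ m →
    lo < hi → bBase n lo ≤ k → k < bBase n hi →
    bBase n (bSearch n k lo hi) ≤ k ∧ k < bBase n (bSearch n k lo hi + 1) ∧
      lo ≤ bSearch n k lo hi ∧ bSearch n k lo hi < hi := by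
  induction m with
  | zero => intro lo hi hm hlt _ _; omega
  | succ m ih =>
    intro lo hi hm hlt h1 h2
    rw [bSearch]
    by_cases hgap : 1 < hi - lo
    · rw [dif_pos hgap]
      have hb : lo < PySem.Int.floordiv (lo + hi) 2 ∧ PySem.Int.floordiv (lo + hi) 2 < hi := by
        rw [PySem.Int.floordiv_eq_ediv_of_pos (by norm_num : (0:Int) < 2)]
        omega
      by_cases hc : bBase n (PySem.Int.floordiv (lo + hi) 2) ≤ k
      · rw [if_pos hc]
        have := ih (PySem.Int.floordiv (lo + hi) 2) hi (by omega) (by omega) hc h2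
        exact ⟨this.1, this.2.1, by omega, this.2.2.2⟩
      · rw [if_neg hc]
        have := ih lo (PySem.Int.floordiv (lo + hi) 2) (by omega) (by omega) h1 (by omega)
        exact ⟨this.1, this.2.1, this.2.2.1, by omega⟩
    · rw [dif_neg hgap]
      have : hi = lo + 1 := by omega
      refine ⟨h1, ?_, le_refl lo, hlt⟩
      rw [← this]; exact h2

theorem bUnrank_eq (n k i : Int) (hn : 2 ≤ n) (h0 : 0 ≤ i) (hi : i < n - 1)
    (h1 : bBase n i ≤ k) (h2 : k < bBase n (i + 1)) :
    bUnrank n k = (i, i + 1 + (k - bBase n i)) := by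
  unfold bUnrank
  have h00 : bBase n 0 ≤ k := le_trans (bBase_mono n le_rfl h0 (by omega)) h1
  have htot : k < bBase n (n - 1) :=
    lt_of_lt_of_le h2 (bBase_mono n (by omega) (by omega) le_rfl)
  rw [bBase_zero] at h00
  obtain ⟨s1, s2, s3, s4⟩ :=
    bSearch_spec n k (n - 1).toNat 0 (n - 1) (by omega) (by omega) (by rw [bBase_zero]; omega) htot
  set r := bSearch n k 0 (n - 1) with hr
  have hri : r = i := by
    by_contra hne
    rcases lt_or_gt_of_ne hne with hlt | hgt
    · have : bBase n (r + 1) ≤ bBase n i := bBase_mono n (by omega) (by omega) (by omega)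
      omega
    · have : bBase n (i + 1) ≤ bBase n r := bBase_mono n (by omega) (by omega) (by omega)
      omega
  rw [hri]

theorem take_pyRange (a b : Int) (k : Nat) :
    (PySem.List.pyRange a b 1).take k = PySem.List.pyRange a (min (a + k) b) 1 := by
  rw [PySem.List.pyRange_one, PySem.List.pyRange_one, ← List.map_take, List.take_range]
  have h : min k (b - a).toNat = (min (a + (k : Int)) b - a).toNat := by omega
  rw [h]

theorem drop_pyRange (a b : Int) (k : Nat) :
    (PySem.List.pyRange a b 1).drop k = PySem.List.pyRange (a + k) b 1 := by
  by_cases h : b ≤ a + k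
  · rw [List.drop_eq_nil_of_le (by rw [PySem.List.length_pyRange_one]; omega),
        PySem.List.pyRange_one_eq_nil h]
  · rw [PySem.List.pyRange_one_append a (a + k) b (by omega) (by omega)]
    have hlen : (PySem.List.pyRange a (a + k) 1).length = k := by
      rw [PySem.List.length_pyRange_one]; omega
    exact List.drop_left' hlen

theorem bLoop_eq_chunks (n : Int) (s : Nat) (total : Int) (m : Nat) : ∀ start : Int,
    (total - start).toNat ≤ m →
    bLoop n s total start = pvChunks s ((PySem.List.pyRange start total 1).map (bUnrank n)) := by
  induction m with
  | zero =>
    intro start hm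
    rw [bLoop, dif_neg (by omega), PySem.List.pyRange_one_eq_nil (by omega)]
    simp [pvChunks]
  | succ m ih =>
    intro start hm
    by_cases h : start < total
    · rw [bLoop, dif_pos h]
      have hne : (PySem.List.pyRange start total 1).map (bUnrank n) ≠ [] := by
        rw [PySem.List.pyRange_one_cons h]; simp
      rw [pvChunks_ne_nil s _ hne]
      have htake : ((PySem.List.pyRange start total 1).map (bUnrank n)).take (s + 1) =
          (PySem.List.pyRange start (min (start + ((s : Int) + 1)) total) 1).map (bUnrank n) := by
        rw [← List.map_take, take_pyRange]
        norm_cast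
      have hdrop : ((PySem.List.pyRange start total 1).map (bUnrank n)).drop (s + 1) =
          (PySem.List.pyRange (start + ((s : Int) + 1)) total 1).map (bUnrank n) := by
        rw [← List.map_drop, drop_pyRange]
        norm_cast
      rw [htake, hdrop, ih (start + ((s : Int) + 1)) (by omega)]
    · rw [bLoop, dif_neg h, PySem.List.pyRange_one_eq_nil (by omega)]
      simp [pvChunks]

-- the stream, row by row, equals unranking of the global index range
theorem pvStream_rows (n : Int) (hn : 2 ≤ n) (m : Nat) : ∀ i : Int, 0 ≤ i → i ≤ n - 1 →
    (n - 1 - i).toNat ≤ m →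
    (PySem.List.pyRange i n 1).flatMap
        (fun i => (PySem.List.pyRange (i + 1) n 1).map (fun j => (i, j))) =
    (PySem.List.pyRange (bBase n i) (bBase n (n - 1)) 1).map (bUnrank n) := by
  induction m with
  | zero =>
    intro i h0 h1 hm
    have : i = n - 1 := by omega
    subst this
    have e1 : PySem.List.pyRange (n - 1) n 1 = [n - 1] := by
      rw [PySem.List.pyRange_one_cons (by omega), PySem.List.pyRange_one_eq_nil (by omega)]
    have e3 : PySem.List.pyRange (bBase n (n - 1)) (bBase n (n - 1)) 1 = [] :=
      PySem.List.pyRange_one_eq_nil le_rfl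
    rw [e1, e3]
    simp [PySem.List.pyRange_one_eq_nil]
  | succ m ih =>
    intro i h0 h1 hm
    by_cases hlast : i = n - 1
    · subst hlast
      have e1 : PySem.List.pyRange (n - 1) n 1 = [n - 1] := by
        rw [PySem.List.pyRange_one_cons (by omega), PySem.List.pyRange_one_eq_nil (by omega)]
      have e3 : PySem.List.pyRange (bBase n (n - 1)) (bBase n (n - 1)) 1 = [] :=
        PySem.List.pyRange_one_eq_nil le_rfl
      rw [e1, e3]
      simp [PySem.List.pyRange_one_eq_nil]
    · have hi : i < n - 1 := by omega
      rw [PySem.List.pyRange_one_cons (by omega), List.flatMap_cons]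
      rw [PySem.List.pyRange_one_append (bBase n i) (bBase n (i + 1)) (bBase n (n - 1))
        (bBase_mono n h0 (by omega) (by omega)) (bBase_mono n (by omega) (by omega) le_rfl)]
      rw [List.map_append]
      congr 1
      · -- this row: pairs (i, j) for j in [i+1, n) = unrank of [base i, base (i+1))
        rw [PySem.List.pyRange_one, PySem.List.pyRange_one, List.map_map, List.map_map]
        have hlen : (bBase n (i + 1) - bBase n i).toNat = (n - (i + 1)).toNat := by
          have := bBase_succ n i
          omega
        rw [hlen]
        apply List.map_congr_left
        intro k hk
        simp only [List.mem_range] at hk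
        have hk' : (k : Int) < n - 1 - i := by
          have := bBase_succ n i
          omega
        simp only [Function.comp_apply]
        rw [bUnrank_eq n (bBase n i + k) i hn h0 hi (by omega)
          (by have := bBase_succ n i; omega)]
        congr 1
        ring
      · exact ih (i + 1) (by omega) (by omega) (by omega)

theorem pvStream_eq_unrank (n : Int) (hn : 2 ≤ n) :
    pvStream n = (PySem.List.pyRange 0 (bBase n (n - 1)) 1).map (bUnrank n) := by
  unfold pvStream
  rw [show (0 : Int) = bBase n 0 from (bBase_zero n).symm] 
  nth_rewrite 1 [show bBase n 0 = 0 from bBase_zero n]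
  rw [pvStream_rows n hn (n - 1).toNat 0 le_rfl (by omega) (by omega)]

theorem pvStream_nil (n : Int) (hn : n < 2) : pvStream n = [] := by
  unfold pvStream
  rw [List.flatMap_eq_nil_iff]
  intro i hi
  rw [PySem.List.mem_pyRange_one] at hi
  rw [PySem.List.pyRange_one_eq_nil (by omega)]
  simp

-- ===== VERDICT (by name: the statement is the Claim_ definition above) =====
theorem pair_batcher_spec : Claim_equal_pair_batcher := by
  intro n batch_size _
  unfold Spec_pair_batcher pair_batcher_alt
  rw [pvA_eq_chunks]
  by_cases hn : 2 ≤ n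
  · rw [if_pos hn]
    rw [bLoop_eq_chunks n _ _ (PySem.Int.floordiv (n * (n - 1)) 2).toNat 0 (by omega)]
    rw [pvStream_eq_unrank n hn]
    have : PySem.Int.floordiv (n * (n - 1)) 2 = bBase n (n - 1) := by
      unfold bBase
      congr 1
      ring
    rw [this]
  · rw [if_neg hn]
    rw [bLoop_eq_chunks n _ _ 0 0 (by omega)]
    rw [PySem.List.pyRange_one_eq_nil le_rfl, pvStream_nil n (by omega)]
    simp
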